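-- pv_equiv track=rewrite | github.com/K4rthik-Suresh/AI-Resource-Allocation | ai/ai_module.py | _extract_resource_type
-- ===== SOURCE A (Python) =====
-- def _extract_resource_type(text):
--     """Extract resource type - recognizes hall, room, lab, sports, equipment"""
--     text_lower = text.lower()
--
--     # Check for hall first (before general conference/meeting terms)
--     if any(word in text_lower for word in ['hall', 'ballroom', 'banquet', 'grand hall', 'event hall']):
--         return 'hall'
--
--     # Conference/meeting rooms
--     if any(word in text_lower for word in ['conference', 'meeting', 'board', 'boardroom']):
--         return 'room'
--
--     # Labs and research spaces
--     if any(word in text_lower for word in ['lab', 'laboratory', 'research']):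
--         return 'lab'
--
--     # Auditoriums and theaters
--     if any(word in text_lower for word in ['auditorium', 'theater', 'theatre', 'lecture hall']):
--         return 'auditorium'
--
--     # Sports facilities
--     if any(word in text_lower for word in ['court', 'sports', 'field', 'badminton', 'tennis', 'gym']):
--         return 'sports'
--
--     # Equipment and tools
--     if any(word in text_lower for word in ['equipment', 'device', 'tool', 'device']):
--         return 'equipment'
--
--     return 'room'  # Default to room
-- ===== SOURCE B (Python) =====
-- _TYPES = ['hall', 'room', 'lab', 'auditorium', 'sports', 'equipment']
--
-- # Flat keyword -> priority index (lower index = higher priority, matching the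
-- # original branch order); built once, so there is no per-type inner scan.
-- _KEYWORD_PRIORITY = {
--     'hall': 0, 'ballroom': 0, 'banquet': 0, 'grand hall': 0, 'event hall': 0,
--     'conference': 1, 'meeting': 1, 'board': 1, 'boardroom': 1,
--     'lab': 2, 'laboratory': 2, 'research': 2,
--     'auditorium': 3, 'theater': 3, 'theatre': 3, 'lecture hall': 3,
--     'court': 4, 'sports': 4, 'field': 4, 'badminton': 4, 'tennis': 4, 'gym': 4,
--     'equipment': 5, 'device': 5, 'tool': 5,
-- }
--
--
-- def _extract_resource_type(text):
--     """Extract resource type - recognizes hall, room, lab, sports, equipment"""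
--     text_lower = text.lower()
--     hits = [p for kw, p in _KEYWORD_PRIORITY.items() if kw in text_lower]
--     return _TYPES[min(hits)] if hits else 'room'
-- ===== Notes on version B (the rewrite author's own statement) =====
-- stated objective: alternative
-- what changed: Instead of an early-return chain of per-type any() scans, B flattens all keywords into one keyword->priority map, collects every matching keyword's priority in a single comprehension, and returns the type of the minimum priority (or 'room' if none matched).
import Mathlib
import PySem

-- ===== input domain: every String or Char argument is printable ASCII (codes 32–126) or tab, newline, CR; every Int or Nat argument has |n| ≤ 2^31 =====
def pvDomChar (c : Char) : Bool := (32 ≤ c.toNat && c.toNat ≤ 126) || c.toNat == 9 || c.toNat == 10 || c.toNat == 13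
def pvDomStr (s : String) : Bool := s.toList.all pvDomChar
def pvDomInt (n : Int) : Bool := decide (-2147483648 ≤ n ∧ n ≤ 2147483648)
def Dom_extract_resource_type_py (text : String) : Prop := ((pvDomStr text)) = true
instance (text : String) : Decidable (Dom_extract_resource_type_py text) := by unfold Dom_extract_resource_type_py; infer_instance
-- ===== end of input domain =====

-- B replaces A's early-return chain of per-type any() scans with one flat keyword->priority
-- map, collecting every matching keyword's priority and returning the type of the minimum
-- priority (objective: alternative).

-- ===== PORT A =====
def extract_resource_type_py (text : String) : String :=
  let text_lower := PySem.Str.lower text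
  if ["hall", "ballroom", "banquet", "grand hall", "event hall"].any (fun w => PySem.Str.isIn w text_lower) then "hall"
  else if ["conference", "meeting", "board", "boardroom"].any (fun w => PySem.Str.isIn w text_lower) then "room"
  else if ["lab", "laboratory", "research"].any (fun w => PySem.Str.isIn w text_lower) then "lab"
  else if ["auditorium", "theater", "theatre", "lecture hall"].any (fun w => PySem.Str.isIn w text_lower) then "auditorium"
  else if ["court", "sports", "field", "badminton", "tennis", "gym"].any (fun w => PySem.Str.isIn w text_lower) then "sports"
  else if ["equipment", "device", "tool", "device"].any (fun w => PySem.Str.isIn w text_lower) then "equipment"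
  else "room"

-- ===== PORT B =====
def pvTypes : List String := ["hall", "room", "lab", "auditorium", "sports", "equipment"]

-- the dict _KEYWORD_PRIORITY as an association list in insertion order (keys distinct)
def pvKeywordPriority : List (String × Int) :=
  [("hall", 0), ("ballroom", 0), ("banquet", 0), ("grand hall", 0), ("event hall", 0),
   ("conference", 1), ("meeting", 1), ("board", 1), ("boardroom", 1),
   ("lab", 2), ("laboratory", 2), ("research", 2),
   ("auditorium", 3), ("theater", 3), ("theatre", 3), ("lecture hall", 3),
   ("court", 4), ("sports", 4), ("field", 4), ("badminton", 4), ("tennis", 4), ("gym", 4),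
   ("equipment", 5), ("device", 5), ("tool", 5)]

def extract_resource_type_py_alt (text : String) : String :=
  let text_lower := PySem.Str.lower text
  let hits := pvKeywordPriority.filterMap
    (fun kp => if PySem.Str.isIn kp.1 text_lower then some kp.2 else none)
  match PySem.List.min? hits (fun x => x) with
  | some p => PySem.List.pyGetD pvTypes p "room"   -- _TYPES[min(hits)]: p is always 0..5, in range
  | none => "room"

-- ===== PRECONDITION & SPEC =====
def Spec_extract_resource_type_py (text : String) (out : String) : Prop := out = extract_resource_type_py_alt text
instance (text : String) (out : String) : Decidable (Spec_extract_resource_type_py text out) := by unfold Spec_extract_resource_type_py; infer_instance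

-- ===== CLAIM (what is proved, stated in full; the proofs are below) =====
def Claim_equal_extract_resource_type_py : Prop := ∀ (text : String), Dom_extract_resource_type_py text → Spec_extract_resource_type_py text (extract_resource_type_py text)

-- ===== LEMMAS AND PROOFS =====

-- one segment of B's flat comprehension: the priorities contributed by one rule's keywords
def pvSeg (kws : List String) (p : Int) (tl : String) : List Int :=
  kws.filterMap (fun k => if PySem.Str.isIn k tl then some p else none)

lemma pvHits_eq (tl : String) :
    pvKeywordPriority.filterMap (fun kp => if PySem.Str.isIn kp.1 tl then some kp.2 else none)
    = pvSeg ["hall", "ballroom", "banquet", "grand hall", "event hall"] 0 tl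
      ++ (pvSeg ["conference", "meeting", "board", "boardroom"] 1 tl
      ++ (pvSeg ["lab", "laboratory", "research"] 2 tl
      ++ (pvSeg ["auditorium", "theater", "theatre", "lecture hall"] 3 tl
      ++ (pvSeg ["court", "sports", "field", "badminton", "tennis", "gym"] 4 tl
      ++ pvSeg ["equipment", "device", "tool"] 5 tl)))) := by
  have h : pvKeywordPriority
      = (["hall", "ballroom", "banquet", "grand hall", "event hall"].map (fun k => (k, (0 : Int))))
      ++ ((["conference", "meeting", "board", "boardroom"].map (fun k => (k, (1 : Int))))
      ++ ((["lab", "laboratory", "research"].map (fun k => (k, (2 : Int))))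
      ++ ((["auditorium", "theater", "theatre", "lecture hall"].map (fun k => (k, (3 : Int))))
      ++ ((["court", "sports", "field", "badminton", "tennis", "gym"].map (fun k => (k, (4 : Int))))
      ++ (["equipment", "device", "tool"].map (fun k => (k, (5 : Int)))))))) := by rfl
  rw [h]
  simp only [List.filterMap_append, List.filterMap_map, Function.comp, pvSeg]

lemma pvSeg_nil {kws : List String} {tl : String} (p : Int)
    (h : kws.any (fun w => PySem.Str.isIn w tl) = false) : pvSeg kws p tl = [] := by
  rw [List.any_eq_false] at h
  rw [pvSeg, List.filterMap_eq_nil_iff]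
  intro k hk
  rw [if_neg (h k hk)]

lemma pvSeg_mem {kws : List String} {tl : String} {p x : Int}
    (hx : x ∈ pvSeg kws p tl) : x = p := by
  rw [pvSeg, List.mem_filterMap] at hx
  obtain ⟨k, _, hk⟩ := hx
  split at hk
  · exact (Option.some.inj hk).symm
  · simp at hk

lemma pvSeg_ne_nil {kws : List String} {tl : String} (p : Int)
    (h : kws.any (fun w => PySem.Str.isIn w tl) = true) : pvSeg kws p tl ≠ [] := by
  rw [List.any_eq_true] at h
  obtain ⟨k, hk, hin⟩ := h
  intro hnil
  rw [pvSeg, List.filterMap_eq_nil_iff] at hnil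
  have := hnil k hk
  rw [if_pos hin] at this
  cases this

-- first-match = minimum of the flat hits: a constant nonempty prefix below everything after it
lemma pvFoldl_min_const (l : List Int) (a : Int) (h : ∀ x ∈ l, a ≤ x) :
    l.foldl min a = a := by
  induction l generalizing a with
  | nil => rfl
  | cons y t ih =>
    rw [List.foldl_cons, min_eq_left (h y (by simp))]
    exact ih a (fun x hx => h x (by simp [hx]))

lemma pvMin_prefix (p : Int) (l1 l2 : List Int) (h1 : l1 ≠ [])
    (he : ∀ x ∈ l1, x = p) (hge : ∀ x ∈ l2, p ≤ x) :
    PySem.List.min? (l1 ++ l2) (fun x => x) = some p := by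
  cases l1 with
  | nil => exact absurd rfl h1
  | cons q t =>
    have hq : q = p := he q (by simp)
    subst hq
    rw [List.cons_append, PySem.List.min?_id_cons]
    refine congrArg some (pvFoldl_min_const _ _ ?_)
    intro x hx
    rcases List.mem_append.mp hx with h | h
    · exact le_of_eq (he x (by simp [h])).symm
    · exact hge x h

-- A's last keyword list repeats 'device'; the dict keeps one copy: the any() tests agree
lemma pvAny_equip (tl : String) :
    (["equipment", "device", "tool", "device"].any (fun w => PySem.Str.isIn w tl))
    = (["equipment", "device", "tool"].any (fun w => PySem.Str.isIn w tl)) := by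
  simp only [List.any_cons, List.any_nil]
  cases PySem.Str.isIn "equipment" tl <;> cases PySem.Str.isIn "device" tl <;>
    cases PySem.Str.isIn "tool" tl <;> rfl

-- ===== VERDICT (by name: the statement is the Claim_ definition above) =====
theorem extract_resource_type_py_spec : Claim_equal_extract_resource_type_py := by
  intro text _
  simp only [Spec_extract_resource_type_py, extract_resource_type_py, extract_resource_type_py_alt]
  set tl := PySem.Str.lower text with htl
  rw [pvHits_eq tl, pvAny_equip tl]
  by_cases h0 : (["hall", "ballroom", "banquet", "grand hall", "event hall"].any (fun w => PySem.Str.isIn w tl)) = true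
  · rw [if_pos h0]
    rw [pvMin_prefix 0 _ _ (pvSeg_ne_nil 0 h0) (fun x hx => pvSeg_mem hx)
        (fun x hx => by
          simp only [List.mem_append] at hx
          rcases hx with h|h|h|h|h <;> have := pvSeg_mem h <;> omega)]
    decide
  by_cases h1 : (["conference", "meeting", "board", "boardroom"].any (fun w => PySem.Str.isIn w tl)) = true
  · rw [if_neg h0, if_pos h1]
    simp only [pvSeg_nil 0 (Bool.eq_false_iff.mpr h0), List.nil_append]
    rw [pvMin_prefix 1 _ _ (pvSeg_ne_nil 1 h1) (fun x hx => pvSeg_mem hx)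
        (fun x hx => by
          simp only [List.mem_append] at hx
          rcases hx with h|h|h|h <;> have := pvSeg_mem h <;> omega)]
    decide
  by_cases h2 : (["lab", "laboratory", "research"].any (fun w => PySem.Str.isIn w tl)) = true
  · rw [if_neg h0, if_neg h1, if_pos h2]
    simp only [pvSeg_nil 0 (Bool.eq_false_iff.mpr h0), pvSeg_nil 1 (Bool.eq_false_iff.mpr h1), List.nil_append]
    rw [pvMin_prefix 2 _ _ (pvSeg_ne_nil 2 h2) (fun x hx => pvSeg_mem hx)
        (fun x hx => by
          simp only [List.mem_append] at hx
          rcases hx with h|h|h <;> have := pvSeg_mem h <;> omega)]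
    decide
  by_cases h3 : (["auditorium", "theater", "theatre", "lecture hall"].any (fun w => PySem.Str.isIn w tl)) = true
  · rw [if_neg h0, if_neg h1, if_neg h2, if_pos h3]
    simp only [pvSeg_nil 0 (Bool.eq_false_iff.mpr h0), pvSeg_nil 1 (Bool.eq_false_iff.mpr h1), pvSeg_nil 2 (Bool.eq_false_iff.mpr h2), List.nil_append]
    rw [pvMin_prefix 3 _ _ (pvSeg_ne_nil 3 h3) (fun x hx => pvSeg_mem hx)
        (fun x hx => by
          simp only [List.mem_append] at hx
          rcases hx with h|h <;> have := pvSeg_mem h <;> omega)]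
    decide
  by_cases h4 : (["court", "sports", "field", "badminton", "tennis", "gym"].any (fun w => PySem.Str.isIn w tl)) = true
  · rw [if_neg h0, if_neg h1, if_neg h2, if_neg h3, if_pos h4]
    simp only [pvSeg_nil 0 (Bool.eq_false_iff.mpr h0), pvSeg_nil 1 (Bool.eq_false_iff.mpr h1), pvSeg_nil 2 (Bool.eq_false_iff.mpr h2), pvSeg_nil 3 (Bool.eq_false_iff.mpr h3), List.nil_append]
    rw [pvMin_prefix 4 _ _ (pvSeg_ne_nil 4 h4) (fun x hx => pvSeg_mem hx)
        (fun x hx => by have := pvSeg_mem hx; omega)]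
    decide
  by_cases h5 : (["equipment", "device", "tool"].any (fun w => PySem.Str.isIn w tl)) = true
  · rw [if_neg h0, if_neg h1, if_neg h2, if_neg h3, if_neg h4, if_pos h5]
    simp only [pvSeg_nil 0 (Bool.eq_false_iff.mpr h0), pvSeg_nil 1 (Bool.eq_false_iff.mpr h1), pvSeg_nil 2 (Bool.eq_false_iff.mpr h2), pvSeg_nil 3 (Bool.eq_false_iff.mpr h3), pvSeg_nil 4 (Bool.eq_false_iff.mpr h4), List.nil_append]
    rw [← List.append_nil (pvSeg ["equipment", "device", "tool"] 5 tl),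
        pvMin_prefix 5 _ _ (pvSeg_ne_nil 5 h5) (fun x hx => pvSeg_mem hx)
        (fun x hx => by simp at hx)]
    decide
  rw [if_neg h0, if_neg h1, if_neg h2, if_neg h3, if_neg h4, if_neg h5]
  simp only [pvSeg_nil 0 (Bool.eq_false_iff.mpr h0), pvSeg_nil 1 (Bool.eq_false_iff.mpr h1), pvSeg_nil 2 (Bool.eq_false_iff.mpr h2), pvSeg_nil 3 (Bool.eq_false_iff.mpr h3), pvSeg_nil 4 (Bool.eq_false_iff.mpr h4), pvSeg_nil 5 (Bool.eq_false_iff.mpr h5), List.nil_append]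
  rfl
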